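-- pv_equiv track=rewrite | github.com/LocusLontrime/Python | CodeWars_Rush/6kyu/The_furthest_distance_of_index_6kyu.py | furthest_distance_b4b
-- ===== SOURCE A (Python) =====
-- def furthest_distance_b4b(arr, k):
--     lenArr = currL = len(arr)
--     while currL >= 2:
--         for i in range(lenArr-currL+1):
--             if abs(arr[i]-arr[currL-1+i]) >= k:
--                 return currL-1
--         currL -= 1
--     return -1
-- ===== SOURCE B (Python) =====
-- def furthest_distance_b4b(arr, k):
--     # O(n log n): prefix minima/maxima + per-endpoint binary search for the
--     # earliest start i with |arr[i]-arr[j]| >= k (i.e. arr[i] <= arr[j]-k or arr[i] >= arr[j]+k).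
--     n = len(arr)
--     pmin = []
--     pmax = []
--     for x in arr:
--         pmin.append(x if not pmin else min(pmin[-1], x))
--         pmax.append(x if not pmax else max(pmax[-1], x))
--     best = -1
--     for j in range(1, n):
--         x = arr[j]
--         lo, hi = 0, j
--         while lo < hi:
--             mid = (lo + hi) // 2
--             if pmin[mid] <= x - k or pmax[mid] >= x + k:
--                 hi = mid
--             else:
--                 lo = mid + 1
--         if lo < j and best < j - lo:
--             best = j - lo
--     return best
-- ===== Notes on version B (the rewrite author's own statement) =====
-- stated objective: faster
-- what changed: Replaced A's shrinking-width rescan over all widths (O(n^2)) by one pass that precomputes prefix minima/maxima and binary-searches, for each end index j, the earliest start i with |arr[i]-arr[j]| >= k (O(n log n)).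
import Mathlib
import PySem

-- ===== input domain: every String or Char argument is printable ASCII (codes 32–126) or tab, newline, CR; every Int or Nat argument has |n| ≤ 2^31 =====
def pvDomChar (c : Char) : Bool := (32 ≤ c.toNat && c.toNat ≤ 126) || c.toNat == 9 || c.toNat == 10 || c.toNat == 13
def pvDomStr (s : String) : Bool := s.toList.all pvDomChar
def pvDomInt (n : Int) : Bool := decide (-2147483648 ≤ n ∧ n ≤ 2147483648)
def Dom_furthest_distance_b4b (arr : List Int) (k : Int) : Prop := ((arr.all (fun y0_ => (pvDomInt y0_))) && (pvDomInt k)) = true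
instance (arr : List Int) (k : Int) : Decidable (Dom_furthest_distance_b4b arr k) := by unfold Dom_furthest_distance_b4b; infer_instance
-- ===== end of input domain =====

-- B replaces A's shrinking-width O(n^2) rescan by prefix minima/maxima plus a
-- per-endpoint binary search for the earliest qualifying start (O(n log n)).

-- ===== PORT A =====
-- the inner `for i in range(lenArr-currL+1)` loop; indices are always in range
-- on the call path (i ≤ lenArr-currL, so currL-1+i < lenArr), so getD 0 is exact
def aFor (arr : List Int) (k : Int) (currL : Nat) : List Nat → Option Int
  | [] => none
  | i :: rest =>
      if k ≤ |arr.getD i 0 - arr.getD (currL - 1 + i) 0| then some ((currL : Int) - 1)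
      else aFor arr k currL rest

-- the `while currL >= 2` loop, recursing on currL
def aWhile (arr : List Int) (k : Int) : Nat → Int
  | c + 2 =>
      match aFor arr k (c + 2) (List.range (arr.length - (c + 2) + 1)) with
      | some r => r
      | none => aWhile arr k (c + 1)
  | _ => -1

def furthest_distance_b4b (arr : List Int) (k : Int) : Int := aWhile arr k arr.length

-- ===== PORT B =====
-- pmin.append(x if not pmin else min(pmin[-1], x))
def pushMin (acc : List Int) (x : Int) : List Int :=
  match acc.getLast? with
  | none => acc ++ [x]
  | some m => acc ++ [min m x]

def pushMax (acc : List Int) (x : Int) : List Int :=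
  match acc.getLast? with
  | none => acc ++ [x]
  | some m => acc ++ [max m x]

-- the `while lo < hi` binary search; mid < hi ≤ j < len on the call path, so getD 0 is exact
def bsearch (pmin pmax : List Int) (x k : Int) (lo hi : Nat) : Nat :=
  if _h : lo < hi then
    let mid := (lo + hi) / 2
    if pmin.getD mid 0 ≤ x - k ∨ x + k ≤ pmax.getD mid 0 then
      bsearch pmin pmax x k lo mid
    else
      bsearch pmin pmax x k (mid + 1) hi
  else lo
termination_by hi - lo
decreasing_by all_goals omega

def furthest_distance_b4b_alt (arr : List Int) (k : Int) : Int :=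
  let n := arr.length
  let pmin := arr.foldl pushMin []
  let pmax := arr.foldl pushMax []
  -- `for j in range(1, n)` is (List.range n).drop 1
  ((List.range n).drop 1).foldl
    (fun best j =>
      let lo := bsearch pmin pmax (arr.getD j 0) k 0 j
      if lo < j ∧ best < (j : Int) - (lo : Int) then (j : Int) - (lo : Int) else best)
    (-1)

-- ===== PRECONDITION & SPEC =====
def Spec_furthest_distance_b4b (arr : List Int) (k : Int) (out : Int) : Prop := out = furthest_distance_b4b_alt arr k
instance (arr : List Int) (k : Int) (out : Int) : Decidable (Spec_furthest_distance_b4b arr k out) := by unfold Spec_furthest_distance_b4b; infer_instance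

-- ===== CLAIM (what is proved, stated in full; the proofs are below) =====
def Claim_equal_furthest_distance_b4b : Prop := ∀ (arr : List Int) (k : Int), Dom_furthest_distance_b4b arr k → Spec_furthest_distance_b4b arr k (furthest_distance_b4b arr k)

-- ===== LEMMAS AND PROOFS =====

-- a valid gap: some pair at distance d (d ≥ 1) differs by at least k
def Valid (arr : List Int) (k : Int) (d : Nat) : Prop :=
  1 ≤ d ∧ ∃ i : Nat, i + d < arr.length ∧ k ≤ |arr.getD i 0 - arr.getD (i + d) 0|

-- the value both programs compute: the largest valid gap, or -1 if none
def CharR (arr : List Int) (k r : Int) : Prop :=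
  (r = -1 ∧ ∀ d, ¬ Valid arr k d) ∨
  (∃ dn : Nat, r = (dn : Int) ∧ Valid arr k dn ∧ ∀ d, Valid arr k d → d ≤ dn)

lemma valid_lt (arr : List Int) (k : Int) (d : Nat) (h : Valid arr k d) : d < arr.length := by
  obtain ⟨_, i, hi, _⟩ := h; omega

lemma charR_unique (arr : List Int) (k r r' : Int)
    (h : CharR arr k r) (h' : CharR arr k r') : r = r' := by
  rcases h with ⟨e, hn⟩ | ⟨d, e, hv, hm⟩ <;> rcases h' with ⟨e', hn'⟩ | ⟨d', e', hv', hm'⟩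
  · rw [e, e']
  · exact absurd hv' (hn d')
  · exact absurd hv (hn' d)
  · have h1 := hm d' hv'
    have h2 := hm' d hv
    have : d = d' := le_antisymm h2 h1
    rw [e, e', this]

-- ---- A side ----

lemma aFor_cases (arr : List Int) (k : Int) (c : Nat) (l : List Nat) :
    (aFor arr k c l = none ∧ ∀ i ∈ l, ¬ k ≤ |arr.getD i 0 - arr.getD (c - 1 + i) 0|) ∨
    (aFor arr k c l = some ((c : Int) - 1) ∧ ∃ i ∈ l, k ≤ |arr.getD i 0 - arr.getD (c - 1 + i) 0|) := by
  induction l with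
  | nil => left; exact ⟨rfl, by simp⟩
  | cons i rest ih =>
    by_cases h : k ≤ |arr.getD i 0 - arr.getD (c - 1 + i) 0|
    · right
      refine ⟨by simp only [aFor]; rw [if_pos h], ⟨i, by simp, h⟩⟩
    · rcases ih with ⟨he, hall⟩ | ⟨he, j, hj, hcond⟩
      · left
        refine ⟨by simp only [aFor]; rw [if_neg h]; exact he, ?_⟩
        intro t ht
        rcases List.mem_cons.mp ht with rfl | ht'
        · exact h
        · exact hall t ht'
      · right
        exact ⟨by simp only [aFor]; rw [if_neg h]; exact he, j, List.mem_cons_of_mem _ hj, hcond⟩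

lemma aFor_valid_iff (arr : List Int) (k : Int) (c : Nat) (hc2 : 2 ≤ c) (hcn : c ≤ arr.length) :
    ((∃ i ∈ List.range (arr.length - c + 1), k ≤ |arr.getD i 0 - arr.getD (c - 1 + i) 0|) ↔
      Valid arr k (c - 1)) := by
  constructor
  · rintro ⟨i, hi, hcond⟩
    have hi' : i < arr.length - c + 1 := List.mem_range.mp hi
    refine ⟨by omega, i, by omega, ?_⟩
    have : c - 1 + i = i + (c - 1) := by omega
    rwa [this] at hcond
  · rintro ⟨h1, i, hlt, hcond⟩
    refine ⟨i, List.mem_range.mpr (by omega), ?_⟩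
    have : c - 1 + i = i + (c - 1) := by omega
    rwa [this]

lemma aWhile_char (arr : List Int) (k : Int) :
    ∀ c, c ≤ arr.length → (∀ d, c ≤ d → ¬ Valid arr k d) →
      CharR arr k (aWhile arr k c) := by
  intro c
  induction c using Nat.strong_induction_on with
  | _ c ih =>
    match c with
    | 0 =>
      intro _ hno
      left
      refine ⟨rfl, fun d hv => ?_⟩
      rcases Nat.eq_zero_or_pos d with rfl | hd
      · exact absurd hv.1 (by omega)
      · exact hno d (by omega) hv
    | 1 =>
      intro _ hno
      left
      refine ⟨rfl, fun d hv => ?_⟩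
      rcases Nat.eq_zero_or_pos d with rfl | hd
      · exact absurd hv.1 (by omega)
      · exact hno d (by omega) hv
    | m + 2 =>
      intro hcn hno
      show CharR arr k (aWhile arr k (m + 2))
      rcases aFor_cases arr k (m + 2) (List.range (arr.length - (m + 2) + 1)) with
        ⟨he, hall⟩ | ⟨he, hex⟩
      · have hnone : ¬ Valid arr k (m + 1) := by
          intro hv
          rcases (aFor_valid_iff arr k (m + 2) (by omega) hcn).mpr (by simpa using hv) with ⟨i, hi, hc⟩
          exact hall i hi hc
        have : aWhile arr k (m + 2) = aWhile arr k (m + 1) := by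
          conv_lhs => rw [aWhile]
          rw [he]
        rw [this]
        exact ih (m + 1) (by omega) (by omega) (fun d hd hv => by
          rcases Nat.eq_or_lt_of_le hd with rfl | hlt
          · exact hnone hv
          · exact hno d (by omega) hv)
      · have hv : Valid arr k (m + 1) := by
          have := (aFor_valid_iff arr k (m + 2) (by omega) hcn).mp hex
          simpa using this
        have : aWhile arr k (m + 2) = ((m + 2 : Nat) : Int) - 1 := by
          conv_lhs => rw [aWhile]
          rw [he]
        rw [this]
        right
        refine ⟨m + 1, by push_cast; ring, hv, fun d hd => ?_⟩
        by_contra hgt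
        exact hno d (by omega) hd

lemma a_char (arr : List Int) (k : Int) : CharR arr k (furthest_distance_b4b arr k) := by
  unfold furthest_distance_b4b
  exact aWhile_char arr k arr.length le_rfl
    (fun d hd hv => absurd (valid_lt arr k d hv) (by omega))

-- ---- B side: prefix minima / maxima ----

def pminL : List Int → List Int
  | [] => []
  | x :: xs => x :: (pminL xs).map (fun y => min x y)

def pmaxL : List Int → List Int
  | [] => []
  | x :: xs => x :: (pmaxL xs).map (fun y => max x y)

lemma foldl_pushMin (xs : List Int) : ∀ (p : List Int) (m : Int), p.getLast? = some m →
    List.foldl pushMin p xs = p ++ (pminL xs).map (fun y => min m y) := by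
  induction xs with
  | nil => intro p m _; simp [pminL]
  | cons x xs ih =>
    intro p m hm
    have hstep : pushMin p x = p ++ [min m x] := by simp [pushMin, hm]
    have hlast : (p ++ [min m x]).getLast? = some (min m x) := by simp
    calc List.foldl pushMin p (x :: xs)
        = List.foldl pushMin (p ++ [min m x]) xs := by simp [List.foldl, hstep]
      _ = p ++ [min m x] ++ (pminL xs).map (fun y => min (min m x) y) := ih _ _ hlast
      _ = p ++ (pminL (x :: xs)).map (fun y => min m y) := by
          simp [pminL, List.map_map, Function.comp_def, min_assoc]

lemma foldl_pushMax (xs : List Int) : ∀ (p : List Int) (m : Int), p.getLast? = some m →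
    List.foldl pushMax p xs = p ++ (pmaxL xs).map (fun y => max m y) := by
  induction xs with
  | nil => intro p m _; simp [pmaxL]
  | cons x xs ih =>
    intro p m hm
    have hstep : pushMax p x = p ++ [max m x] := by simp [pushMax, hm]
    have hlast : (p ++ [max m x]).getLast? = some (max m x) := by simp
    calc List.foldl pushMax p (x :: xs)
        = List.foldl pushMax (p ++ [max m x]) xs := by simp [List.foldl, hstep]
      _ = p ++ [max m x] ++ (pmaxL xs).map (fun y => max (max m x) y) := ih _ _ hlast
      _ = p ++ (pmaxL (x :: xs)).map (fun y => max m y) := by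
          simp [pmaxL, List.map_map, Function.comp_def, max_assoc]

lemma buildPmin_eq (arr : List Int) : arr.foldl pushMin [] = pminL arr := by
  cases arr with
  | nil => rfl
  | cons x xs =>
    have h1 : pushMin [] x = [x] := by simp [pushMin]
    have : List.foldl pushMin [] (x :: xs) = List.foldl pushMin [x] xs := by
      simp [List.foldl, h1]
    rw [this, foldl_pushMin xs [x] x (by simp)]
    simp [pminL]

lemma buildPmax_eq (arr : List Int) : arr.foldl pushMax [] = pmaxL arr := by
  cases arr with
  | nil => rfl
  | cons x xs =>
    have h1 : pushMax [] x = [x] := by simp [pushMax]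
    have : List.foldl pushMax [] (x :: xs) = List.foldl pushMax [x] xs := by
      simp [List.foldl, h1]
    rw [this, foldl_pushMax xs [x] x (by simp)]
    simp [pmaxL]

lemma pminL_length (xs : List Int) : (pminL xs).length = xs.length := by
  induction xs with
  | nil => rfl
  | cons x xs ih => simp [pminL, ih]

lemma pmaxL_length (xs : List Int) : (pmaxL xs).length = xs.length := by
  induction xs with
  | nil => rfl
  | cons x xs ih => simp [pmaxL, ih]

lemma pminL_le_iff (xs : List Int) : ∀ (i : Nat), i < xs.length → ∀ (c : Int),
    ((pminL xs).getD i 0 ≤ c ↔ ∃ i', i' ≤ i ∧ xs.getD i' 0 ≤ c) := by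
  induction xs with
  | nil => intro i hi; exact absurd hi (by simp)
  | cons x xs ih =>
    intro i hi c
    cases i with
    | zero =>
      simp only [pminL, List.getD_cons_zero]
      constructor
      · intro h; exact ⟨0, le_rfl, by simpa using h⟩
      · rintro ⟨i', hi', h⟩
        have : i' = 0 := by omega
        subst this; simpa using h
    | succ i =>
      have hi' : i < xs.length := by simpa using hi
      have hlen : i < (pminL xs).length := by rw [pminL_length]; exact hi'
      have hmap : (pminL (x :: xs)).getD (i + 1) 0 = min x ((pminL xs).getD i 0) := by
        simp only [pminL, List.getD_cons_succ]
        rw [List.getD_eq_getElem?_getD, List.getD_eq_getElem?_getD,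
          List.getElem?_map, List.getElem?_eq_getElem hlen]
        simp
      rw [hmap]
      constructor
      · intro h
        rcases min_le_iff.mp h with hx | hm
        · exact ⟨0, by omega, by simpa using hx⟩
        · obtain ⟨i', hle, hv⟩ := (ih i hi' c).mp hm
          exact ⟨i' + 1, by omega, by simpa using hv⟩
      · rintro ⟨i', hle, hv⟩
        cases i' with
        | zero => exact min_le_iff.mpr (Or.inl (by simpa using hv))
        | succ t =>
          refine min_le_iff.mpr (Or.inr ((ih i hi' c).mpr ⟨t, by omega, by simpa using hv⟩))

lemma pmaxL_ge_iff (xs : List Int) : ∀ (i : Nat), i < xs.length → ∀ (c : Int),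
    (c ≤ (pmaxL xs).getD i 0 ↔ ∃ i', i' ≤ i ∧ c ≤ xs.getD i' 0) := by
  induction xs with
  | nil => intro i hi; exact absurd hi (by simp)
  | cons x xs ih =>
    intro i hi c
    cases i with
    | zero =>
      simp only [pmaxL, List.getD_cons_zero]
      constructor
      · intro h; exact ⟨0, le_rfl, by simpa using h⟩
      · rintro ⟨i', hi', h⟩
        have : i' = 0 := by omega
        subst this; simpa using h
    | succ i =>
      have hi' : i < xs.length := by simpa using hi
      have hlen : i < (pmaxL xs).length := by rw [pmaxL_length]; exact hi'
      have hmap : (pmaxL (x :: xs)).getD (i + 1) 0 = max x ((pmaxL xs).getD i 0) := by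
        simp only [pmaxL, List.getD_cons_succ]
        rw [List.getD_eq_getElem?_getD, List.getD_eq_getElem?_getD,
          List.getElem?_map, List.getElem?_eq_getElem hlen]
        simp
      rw [hmap]
      constructor
      · intro h
        rcases le_max_iff.mp h with hx | hm
        · exact ⟨0, by omega, by simpa using hx⟩
        · obtain ⟨i', hle, hv⟩ := (ih i hi' c).mp hm
          exact ⟨i' + 1, by omega, by simpa using hv⟩
      · rintro ⟨i', hle, hv⟩
        cases i' with
        | zero => exact le_max_iff.mpr (Or.inl (by simpa using hv))
        | succ t =>
          refine le_max_iff.mpr (Or.inr ((ih i hi' c).mpr ⟨t, by omega, by simpa using hv⟩))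

-- "some start i ≤ r differs from arr[j] by at least k"
def QS (arr : List Int) (k : Int) (j r : Nat) : Prop :=
  ∃ i, i ≤ r ∧ k ≤ |arr.getD i 0 - arr.getD j 0|

lemma abs_split (u v k : Int) : k ≤ |u - v| ↔ u ≤ v - k ∨ v + k ≤ u := by
  rcases abs_cases (u - v) with ⟨h1, _⟩ | ⟨h1, _⟩ <;> omega

lemma Q_iff_QS (arr : List Int) (k : Int) (j r : Nat) (hr : r < arr.length) :
    ((pminL arr).getD r 0 ≤ arr.getD j 0 - k ∨ arr.getD j 0 + k ≤ (pmaxL arr).getD r 0) ↔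
      QS arr k j r := by
  rw [pminL_le_iff arr r hr, pmaxL_ge_iff arr r hr]
  constructor
  · rintro (⟨i, hle, hv⟩ | ⟨i, hle, hv⟩)
    · exact ⟨i, hle, (abs_split _ _ _).mpr (Or.inl hv)⟩
    · exact ⟨i, hle, (abs_split _ _ _).mpr (Or.inr hv)⟩
  · rintro ⟨i, hle, hv⟩
    rcases (abs_split _ _ _).mp hv with h | h
    · exact Or.inl ⟨i, hle, h⟩
    · exact Or.inr ⟨i, hle, h⟩

lemma QS_mono (arr : List Int) (k : Int) (j r r' : Nat) (h : r ≤ r') :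
    QS arr k j r → QS arr k j r' := by
  rintro ⟨i, hle, hv⟩; exact ⟨i, by omega, hv⟩

lemma bsearch_spec (arr : List Int) (k x : Int) (J : Nat) (hJ : J ≤ arr.length)
    (Q : Nat → Prop) (hQ : ∀ t, t < J →
      (Q t ↔ ((pminL arr).getD t 0 ≤ x - k ∨ x + k ≤ (pmaxL arr).getD t 0)))
    (hmono : ∀ s t, s ≤ t → t < J → Q s → Q t) :
    ∀ lo hi, lo ≤ hi → hi ≤ J →
      let r := bsearch (pminL arr) (pmaxL arr) x k lo hi
      lo ≤ r ∧ r ≤ hi ∧ (∀ t, lo ≤ t → t < r → ¬ Q t) ∧ (r < hi → Q r) := by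
  intro lo hi
  generalize hfuel : hi - lo = fuel
  induction fuel using Nat.strong_induction_on generalizing lo hi with
  | _ fuel ih =>
    intro hle hhiJ
    by_cases hlt : lo < hi
    · have hmid : (lo + hi) / 2 < hi := by omega
      have hmidlo : lo ≤ (lo + hi) / 2 := by omega
      have hmidJ : (lo + hi) / 2 < J := by omega
      by_cases hq : (pminL arr).getD ((lo + hi) / 2) 0 ≤ x - k ∨
          x + k ≤ (pmaxL arr).getD ((lo + hi) / 2) 0
      · have hrw : bsearch (pminL arr) (pmaxL arr) x k lo hi
            = bsearch (pminL arr) (pmaxL arr) x k lo ((lo + hi) / 2) := by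
          rw [bsearch]; simp only [dif_pos hlt]; rw [if_pos hq]
        have := ih ((lo + hi) / 2 - lo) (by omega) lo ((lo + hi) / 2) rfl hmidlo (by omega)
        rw [hrw]
        obtain ⟨h1, h2, h3, h4⟩ := this
        refine ⟨h1, by omega, h3, fun hr => ?_⟩
        rcases Nat.lt_or_ge (bsearch (pminL arr) (pmaxL arr) x k lo ((lo + hi) / 2)) ((lo + hi) / 2) with hc | hc
        · exact h4 hc
        · have : bsearch (pminL arr) (pmaxL arr) x k lo ((lo + hi) / 2) = (lo + hi) / 2 := by omega
          rw [this]
          exact (hQ _ hmidJ).mpr hq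
      · have hrw : bsearch (pminL arr) (pmaxL arr) x k lo hi
            = bsearch (pminL arr) (pmaxL arr) x k ((lo + hi) / 2 + 1) hi := by
          rw [bsearch]; simp only [dif_pos hlt]; rw [if_neg hq]
        have := ih (hi - ((lo + hi) / 2 + 1)) (by omega) ((lo + hi) / 2 + 1) hi rfl (by omega) hhiJ
        rw [hrw]
        obtain ⟨h1, h2, h3, h4⟩ := this
        refine ⟨by omega, h2, fun t hlot htr hQt => ?_, h4⟩
        rcases Nat.lt_or_ge t ((lo + hi) / 2 + 1) with hc | hc
        · -- t ≤ mid, so Q t would give Q mid by monotonicity, contradicting hq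
          exact absurd ((hQ _ hmidJ).mp (hmono t ((lo + hi) / 2) (by omega) hmidJ hQt)) hq
        · exact h3 t hc htr hQt
    · have : bsearch (pminL arr) (pmaxL arr) x k lo hi = lo := by
        rw [bsearch]; simp [hlt]
      rw [this]
      exact ⟨le_rfl, hle, fun t h1 h2 => by omega, fun h => by omega⟩

-- the per-endpoint search result
def gIdx (arr : List Int) (k : Int) (j : Nat) : Nat :=
  bsearch (arr.foldl pushMin []) (arr.foldl pushMax []) (arr.getD j 0) k 0 j

lemma gIdx_spec (arr : List Int) (k : Int) (j : Nat) (hj : j < arr.length) :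
    gIdx arr k j ≤ j ∧
    (∀ t, t < gIdx arr k j → ¬ QS arr k j t) ∧
    (gIdx arr k j < j → QS arr k j (gIdx arr k j)) := by
  have h := bsearch_spec arr k (arr.getD j 0) j (by omega) (QS arr k j)
    (fun t ht => (Q_iff_QS arr k j t (by omega)).symm)
    (fun s t hst htJ => QS_mono arr k j s t hst)
    0 j (by omega) le_rfl
  obtain ⟨_, h2, h3, h4⟩ := h
  unfold gIdx
  rw [buildPmin_eq, buildPmax_eq]
  exact ⟨h2, fun t ht => h3 t (by omega) ht, h4⟩

-- gap j - gIdx j is a genuine valid gap (when the search succeeds)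
lemma gIdx_valid (arr : List Int) (k : Int) (j : Nat) (hj : j < arr.length)
    (hlt : gIdx arr k j < j) : Valid arr k (j - gIdx arr k j) := by
  obtain ⟨hle, hmin, hhit⟩ := gIdx_spec arr k j hj
  obtain ⟨i, hile, hv⟩ := hhit hlt
  have hieq : i = gIdx arr k j := by
    by_contra hne
    exact hmin i (by omega) ⟨i, le_rfl, hv⟩
  refine ⟨by omega, gIdx arr k j, by omega, ?_⟩
  have h2 : gIdx arr k j + (j - gIdx arr k j) = j := by omega
  rw [h2, ← hieq]
  exact hv

-- every valid pair ending at j is dominated by the search result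
lemma gIdx_min (arr : List Int) (k : Int) (j i : Nat) (hj : j < arr.length) (hij : i < j)
    (hv : k ≤ |arr.getD i 0 - arr.getD j 0|) : gIdx arr k j ≤ i := by
  obtain ⟨_, hmin, _⟩ := gIdx_spec arr k j hj
  by_contra h
  exact hmin i (by omega) ⟨i, le_rfl, hv⟩

-- B's fold: invariant and lower bounds
def bStep (arr : List Int) (k : Int) (best : Int) (j : Nat) : Int :=
  let lo := bsearch (arr.foldl pushMin []) (arr.foldl pushMax []) (arr.getD j 0) k 0 j
  if lo < j ∧ best < (j : Int) - (lo : Int) then (j : Int) - (lo : Int) else best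

def bInv (arr : List Int) (k b : Int) : Prop :=
  b = -1 ∨ ∃ dn : Nat, b = (dn : Int) ∧ Valid arr k dn

lemma bFold_spec (arr : List Int) (k : Int) (l : List Nat)
    (hl : ∀ j ∈ l, j < arr.length) :
    ∀ b, bInv arr k b →
      bInv arr k (l.foldl (bStep arr k) b) ∧
      b ≤ l.foldl (bStep arr k) b ∧
      (∀ j ∈ l, gIdx arr k j < j → (j : Int) - (gIdx arr k j : Int) ≤ l.foldl (bStep arr k) b) := by
  induction l with
  | nil => intro b hb; exact ⟨hb, le_rfl, by simp⟩
  | cons j rest ih =>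
    intro b hb
    have hjn : j < arr.length := hl j (by simp)
    have hrest : ∀ t ∈ rest, t < arr.length := fun t ht => hl t (List.mem_cons_of_mem _ ht)
    have hstep : bInv arr k (bStep arr k b j) ∧ b ≤ bStep arr k b j ∧
        (gIdx arr k j < j → (j : Int) - (gIdx arr k j : Int) ≤ bStep arr k b j) := by
      unfold bStep
      by_cases hc : gIdx arr k j < j ∧ b < (j : Int) - (gIdx arr k j : Int)
      · have heq : Valid arr k (j - gIdx arr k j) := gIdx_valid arr k j hjn hc.1
        simp only [gIdx] at hc ⊢
        rw [if_pos hc]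
        refine ⟨Or.inr ⟨j - (bsearch (arr.foldl pushMin []) (arr.foldl pushMax []) (arr.getD j 0) k 0 j), by
          push_cast; omega, heq⟩, by omega, fun _ => by omega⟩
      · simp only [gIdx] at hc ⊢
        rw [if_neg hc]
        refine ⟨hb, le_rfl, fun hlt => ?_⟩
        rcases Decidable.not_and_iff_or_not.mp hc with h | h
        · omega
        · omega
    obtain ⟨h1, h2, h3⟩ := hstep
    obtain ⟨r1, r2, r3⟩ := ih hrest (bStep arr k b j) h1
    simp only [List.foldl_cons]
    refine ⟨r1, by omega, fun t ht hlt => ?_⟩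
    rcases List.mem_cons.mp ht with rfl | ht'
    · exact le_trans (h3 hlt) r2
    · exact r3 t ht' hlt

lemma mem_drop_range (n j : Nat) : j ∈ (List.range n).drop 1 ↔ 1 ≤ j ∧ j < n := by
  constructor
  · intro h
    have h1 := List.mem_of_mem_drop h
    have h2 : j < n := List.mem_range.mp h1
    rcases Nat.eq_zero_or_pos j with rfl | hp
    · exfalso
      cases n with
      | zero => simp at h2
      | succ m =>
        rw [List.range_succ_eq_map] at h
        simp at h
    · exact ⟨hp, h2⟩
  · rintro ⟨h1, h2⟩
    cases n with
    | zero => omega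
    | succ m =>
      rw [List.range_succ_eq_map]
      simp only [List.drop_succ_cons, List.drop_zero, List.mem_map, List.mem_range]
      exact ⟨j - 1, by omega, by omega⟩

lemma b_eq_fold (arr : List Int) (k : Int) :
    furthest_distance_b4b_alt arr k = ((List.range arr.length).drop 1).foldl (bStep arr k) (-1) := by
  unfold furthest_distance_b4b_alt bStep
  rfl

lemma b_char (arr : List Int) (k : Int) : CharR arr k (furthest_distance_b4b_alt arr k) := by
  rw [b_eq_fold]
  have hl : ∀ j ∈ (List.range arr.length).drop 1, j < arr.length :=
    fun j hj => ((mem_drop_range _ _).mp hj).2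
  obtain ⟨hinv, _, hbnd⟩ := bFold_spec arr k _ hl (-1) (Or.inl rfl)
  set r := ((List.range arr.length).drop 1).foldl (bStep arr k) (-1) with hr
  have hmax : ∀ d, Valid arr k d → (d : Int) ≤ r := by
    rintro d ⟨hd1, i, hilen, hv⟩
    have hj : i + d ∈ (List.range arr.length).drop 1 :=
      (mem_drop_range _ _).mpr ⟨by omega, hilen⟩
    have hg : gIdx arr k (i + d) ≤ i := gIdx_min arr k (i + d) i hilen (by omega) hv
    have := hbnd (i + d) hj (by omega)
    have hcast : (d : Int) ≤ ((i + d : Nat) : Int) - (gIdx arr k (i + d) : Int) := by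
      push_cast; omega
    omega
  rcases hinv with he | ⟨dn, he, hv⟩
  · left
    refine ⟨he, fun d hd => ?_⟩
    have := hmax d hd
    have := hd.1
    omega
  · right
    exact ⟨dn, he, hv, fun d hd => by have := hmax d hd; omega⟩

-- ===== VERDICT (by name: the statement is the Claim_ definition above) =====
theorem furthest_distance_b4b_spec : Claim_equal_furthest_distance_b4b := by
  intro arr k _
  unfold Spec_furthest_distance_b4b
  exact charR_unique arr k _ _ (a_char arr k) (b_char arr k)
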